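-- pv_equiv track=rewrite | github.com/mohammedmontyano-web/RealEstatePayment | app.py | number_to_arabic_text
-- ===== SOURCE A (Python) =====
-- def number_to_arabic_text(num):
--     units = ["", "واحد", "اثنان", "ثلاثة", "أربعة", "خمسة", "ستة", "سبعة", "ثمانية", "تسعة"]
--     teens = ["عشرة", "أحد عشر", "اثنا عشر", "ثلاثة عشر", "أربعة عشر", "خمسة عشر", "ستة عشر", "سبعة عشر", "ثمانية عشر", "تسعة عشر"]
--     tens = ["", "", "عشرون", "ثلاثون", "أربعون", "خمسون", "ستون", "سبعون", "ثمانون", "تسعون"]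
--     hundreds = ["", "مائة", "مائتان", "ثلاثمائة", "أربعمائة", "خمسمائة", "ستمائة", "سبعمائة", "ثمانمائة", "تسعمائة"]
--     groups = ["", ["ألف", "ألفان", "آلاف", "ألف"], "مليون", "مليار", "تريليون"]
--
--     if num == 0:
--         return "صفر جنيه مصري"
--
--     result = ""
--     num = int(num)
--     i = 0
--
--     while num > 0:
--         group_value = num % 1000
--         num //= 1000
--
--         if group_value > 0:
--             group_text = ""
--             hundred = group_value // 100
--             ten = (group_value % 100) // 10
--             unit = group_value % 10
--
--             if hundred > 0:
--                 group_text = hundreds[hundred]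
--
--             if ten > 0 or unit > 0:
--                 if hundred > 0:
--                     group_text += " و"
--
--                 if ten == 0:
--                     if unit > 0:
--                         group_text += units[unit]
--                 elif ten == 1:
--                     group_text += teens[unit]
--                 else:
--                     if unit > 0:
--                         group_text += f"{units[unit]} و{tens[ten]}"
--                     else:
--                         group_text += tens[ten]
--
--             if group_text:
--                 if i == 0:
--                     result = f"{group_text} {result}"
--                 elif i == 1:
--                     if group_value == 1:
--                         result = f"{groups[i][0]}{' و' + result if result else ''}"
--                     elif group_value == 2:
--                         result = f"{groups[i][1]}{' و' + result if result else ''}"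
--                     elif 3 <= group_value <= 10:
--                         result = f"{group_text} {groups[i][2]}{' و' + result if result else ''}"
--                     else:
--                         result = f"{group_text} {groups[i][3]}{' و' + result if result else ''}"
--                 else:
--                     result = f"{group_text} {groups[i]}{' و' + result if result else ''}"
--         i += 1
--
--     return f"{result.strip()} جنيه مصري لا غير"
-- ===== SOURCE B (Python) =====
-- UNITS = ["", "واحد", "اثنان", "ثلاثة", "أربعة", "خمسة", "ستة", "سبعة", "ثمانية", "تسعة"]
-- TEENS = ["عشرة", "أحد عشر", "اثنا عشر", "ثلاثة عشر", "أربعة عشر", "خمسة عشر", "ستة عشر", "سبعة عشر", "ثمانية عشر", "تسعة عشر"]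
-- TENS = ["", "", "عشرون", "ثلاثون", "أربعون", "خمسون", "ستون", "سبعون", "ثمانون", "تسعون"]
-- HUNDREDS = ["", "مائة", "مائتان", "ثلاثمائة", "أربعمائة", "خمسمائة", "ستمائة", "سبعمائة", "ثمانمائة", "تسعمائة"]
-- SCALE = [(10 ** 12, "تريليون"), (10 ** 9, "مليار"), (10 ** 6, "مليون")]
--
--
-- def _small(n):
--     """Arabic words for 1..999, by recursion on magnitude (hundreds -> remainder)."""
--     if n >= 100:
--         rest = n % 100
--         return HUNDREDS[n // 100] + (" و" + _small(rest) if rest else "")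
--     if n >= 20:
--         u = n % 10
--         return (UNITS[u] + " و" if u else "") + TENS[n // 10]
--     if n >= 10:
--         return TEENS[n - 10]
--     return UNITS[n]
--
--
-- def _spell(n):
--     """Arabic words for n >= 1: peel off the most significant scale and recurse."""
--     for p, word in SCALE:
--         if n >= p:
--             head, rest = divmod(n, p)
--             return _small(head) + " " + word + (" و" + _spell(rest) if rest else "")
--     if n >= 1000:
--         head, rest = divmod(n, 1000)
--         if head == 1:
--             piece = "ألف"
--         elif head == 2:
--             piece = "ألفان"
--         elif head <= 10:
--             piece = _small(head) + " آلاف"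
--         else:
--             piece = _small(head) + " ألف"
--         return piece + (" و" + _spell(rest) if rest else "")
--     return _small(n)
--
--
-- def number_to_arabic_text(num):
--     if num == 0:
--         return "صفر جنيه مصري"
--     n = int(num)
--     text = _spell(n) if n > 0 else ""
--     return f"{text} جنيه مصري لا غير"
-- ===== Notes on version B (the rewrite author's own statement) =====
-- stated objective: alternative
-- what changed: Replaces A's LSB-first while-loop that extracts 3-digit groups with modulo, prepends onto an accumulating result string and finally strips it, by top-down recursive descent: peel off the most significant scale group with divmod by the largest applicable power (10^12/10^9/10^6/10^3) and recurse on the remainder, rendering sub-1000 values by recursion on magnitude (hundreds then remainder) instead of digit extraction into hundred/ten/unit variables; no accumulator and no strip.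
import Mathlib
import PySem

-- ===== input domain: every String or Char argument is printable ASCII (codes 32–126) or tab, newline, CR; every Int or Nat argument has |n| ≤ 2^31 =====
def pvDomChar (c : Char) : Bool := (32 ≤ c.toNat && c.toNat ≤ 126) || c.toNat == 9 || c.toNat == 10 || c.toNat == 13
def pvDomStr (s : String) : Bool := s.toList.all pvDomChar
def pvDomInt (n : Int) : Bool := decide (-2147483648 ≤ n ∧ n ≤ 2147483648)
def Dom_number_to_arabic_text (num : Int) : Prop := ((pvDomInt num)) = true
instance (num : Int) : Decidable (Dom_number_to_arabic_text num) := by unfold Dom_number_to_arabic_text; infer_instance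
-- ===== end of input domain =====

-- B replaces A's LSB-first while-loop (modulo group extraction, string accumulator, final strip)
-- by top-down recursive descent: split off the most significant scale group by divmod with the
-- largest applicable power and recurse on the remainder (objective: alternative).

-- Word tables (module-level constants in B, local lists in A).
def pvUnits : List String := ["", "واحد", "اثنان", "ثلاثة", "أربعة", "خمسة", "ستة", "سبعة", "ثمانية", "تسعة"]
def pvTeens : List String := ["عشرة", "أحد عشر", "اثنا عشر", "ثلاثة عشر", "أربعة عشر", "خمسة عشر", "ستة عشر", "سبعة عشر", "ثمانية عشر", "تسعة عشر"]
def pvTens : List String := ["", "", "عشرون", "ثلاثون", "أربعون", "خمسون", "ستون", "سبعون", "ثمانون", "تسعون"]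
def pvHundreds : List String := ["", "مائة", "مائتان", "ثلاثمائة", "أربعمائة", "خمسمائة", "ستمائة", "سبعمائة", "ثمانمائة", "تسعمائة"]
-- A's groups list: index 1 holds a sub-list (handled by its own branch), indices 2..4 the scale words.
def pvScales : List String := ["", "", "مليون", "مليار", "تريليون"]
-- A's groups[1] sub-list.
def pvThousands : List String := ["ألف", "ألفان", "آلاف", "ألف"]

-- ===== PORT A =====
-- the body of A's "if group_value > 0" block that builds group_text (extracted as a helper)
def pvGroupTextA (gv : Int) : String :=
  let hundred := PySem.Int.floordiv gv 100
  let ten := PySem.Int.floordiv (PySem.Int.mod gv 100) 10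
  let unit := PySem.Int.mod gv 10
  let gt : String := if hundred > 0 then PySem.List.pyGetD pvHundreds hundred "" else ""
  if ten > 0 ∨ unit > 0 then
    let gt := if hundred > 0 then gt ++ " و" else gt
    if ten = 0 then (if unit > 0 then gt ++ PySem.List.pyGetD pvUnits unit "" else gt)
    else if ten = 1 then gt ++ PySem.List.pyGetD pvTeens unit ""
    else if unit > 0 then gt ++ (PySem.List.pyGetD pvUnits unit "" ++ " و" ++ PySem.List.pyGetD pvTens ten "")
    else gt ++ PySem.List.pyGetD pvTens ten ""
  else gt

-- A's while-loop.  pyGetD on pvScales/pvThousands is exact for the indices reachable under Dom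
-- (i ≤ 4; Python would raise IndexError only for numbers ≥ 10^15, outside Dom).
def pvLoopA (num : Int) (i : Int) (result : String) : String :=
  if h : num > 0 then
    let group_value := PySem.Int.mod num 1000
    let num' := PySem.Int.floordiv num 1000
    let result' : String :=
      if group_value > 0 then
        let group_text := pvGroupTextA group_value
        if group_text ≠ "" then
          if i = 0 then group_text ++ " " ++ result
          else if i = 1 then
            if group_value = 1 then
              PySem.List.pyGetD pvThousands 0 "" ++ (if result ≠ "" then " و" ++ result else "")
            else if group_value = 2 then
              PySem.List.pyGetD pvThousands 1 "" ++ (if result ≠ "" then " و" ++ result else "")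
            else if 3 ≤ group_value ∧ group_value ≤ 10 then
              group_text ++ " " ++ PySem.List.pyGetD pvThousands 2 "" ++ (if result ≠ "" then " و" ++ result else "")
            else
              group_text ++ " " ++ PySem.List.pyGetD pvThousands 3 "" ++ (if result ≠ "" then " و" ++ result else "")
          else
            group_text ++ " " ++ PySem.List.pyGetD pvScales i "" ++ (if result ≠ "" then " و" ++ result else "")
        else result
      else result
    pvLoopA num' (i + 1) result'
  else result
termination_by num.toNat
decreasing_by
  rw [PySem.Int.floordiv_eq_ediv_of_pos (by norm_num : (0:Int) < 1000)]
  omega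

def number_to_arabic_text (num : Int) : String :=
  if num = 0 then "صفر جنيه مصري"
  else PySem.Str.strip (pvLoopA num 0 "") ++ " جنيه مصري لا غير"

-- ===== PORT B =====
-- Source B's _small: 1..999 by recursion on magnitude (hundreds, then the remainder)
def pvSmall (n : Int) : String :=
  if h : n ≥ 100 then
    let rest := PySem.Int.mod n 100
    PySem.List.pyGetD pvHundreds (PySem.Int.floordiv n 100) "" ++
      (if rest ≠ 0 then " و" ++ pvSmall rest else "")
  else if n ≥ 20 then
    let u := PySem.Int.mod n 10
    (if u ≠ 0 then PySem.List.pyGetD pvUnits u "" ++ " و" else "") ++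
      PySem.List.pyGetD pvTens (PySem.Int.floordiv n 10) ""
  else if n ≥ 10 then PySem.List.pyGetD pvTeens (n - 10) ""
  else PySem.List.pyGetD pvUnits n ""
termination_by n.toNat
decreasing_by
  rw [PySem.Int.mod_eq_emod_of_pos (by norm_num : (0:Int) < 100)]
  omega

-- Source B's _spell: peel off the most significant scale group and recurse on the remainder
-- (the `for p, word in SCALE` loop over the literal 3-entry table is unrolled)
def pvSpell (n : Int) : String :=
  if h1 : n ≥ 1000000000000 then
    let head := PySem.Int.floordiv n 1000000000000
    let rest := PySem.Int.mod n 1000000000000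
    pvSmall head ++ " " ++ "تريليون" ++ (if rest ≠ 0 then " و" ++ pvSpell rest else "")
  else if h2 : n ≥ 1000000000 then
    let head := PySem.Int.floordiv n 1000000000
    let rest := PySem.Int.mod n 1000000000
    pvSmall head ++ " " ++ "مليار" ++ (if rest ≠ 0 then " و" ++ pvSpell rest else "")
  else if h3 : n ≥ 1000000 then
    let head := PySem.Int.floordiv n 1000000
    let rest := PySem.Int.mod n 1000000
    pvSmall head ++ " " ++ "مليون" ++ (if rest ≠ 0 then " و" ++ pvSpell rest else "")
  else if h4 : n ≥ 1000 then
    let head := PySem.Int.floordiv n 1000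
    let rest := PySem.Int.mod n 1000
    let piece : String :=
      if head = 1 then "ألف"
      else if head = 2 then "ألفان"
      else if head ≤ 10 then pvSmall head ++ " آلاف"
      else pvSmall head ++ " ألف"
    piece ++ (if rest ≠ 0 then " و" ++ pvSpell rest else "")
  else pvSmall n
termination_by n.toNat
decreasing_by
  all_goals first
  | (rw [PySem.Int.mod_eq_emod_of_pos (by norm_num : (0:Int) < 1000000000000)]; omega)
  | (rw [PySem.Int.mod_eq_emod_of_pos (by norm_num : (0:Int) < 1000000000)]; omega)
  | (rw [PySem.Int.mod_eq_emod_of_pos (by norm_num : (0:Int) < 1000000)]; omega)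
  | (rw [PySem.Int.mod_eq_emod_of_pos (by norm_num : (0:Int) < 1000)]; omega)

def number_to_arabic_text_alt (num : Int) : String :=
  if num = 0 then "صفر جنيه مصري"
  else (if num > 0 then pvSpell num else "") ++ " جنيه مصري لا غير"

-- ===== PRECONDITION & SPEC =====
def Spec_number_to_arabic_text (num : Int) (out : String) : Prop := out = number_to_arabic_text_alt num
instance (num : Int) (out : String) : Decidable (Spec_number_to_arabic_text num out) := by unfold Spec_number_to_arabic_text; infer_instance

-- ===== CLAIM (what is proved, stated in full; the proofs are below) =====
def Claim_equal_number_to_arabic_text : Prop := ∀ (num : Int), Dom_number_to_arabic_text num → Spec_number_to_arabic_text num (number_to_arabic_text num)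

-- ===== LEMMAS AND PROOFS =====

-- ---- proof-only helpers ----

-- the text A produces for group gv at scale position i (read off A's branches)
def pvPiece (i : Int) (gv : Int) : String :=
  if i = 0 then pvGroupTextA gv
  else if i = 1 then
    if gv = 1 then "ألف"
    else if gv = 2 then "ألفان"
    else if 3 ≤ gv ∧ gv ≤ 10 then pvGroupTextA gv ++ " آلاف"
    else pvGroupTextA gv ++ " ألف"
  else pvGroupTextA gv ++ " " ++ PySem.List.pyGetD pvScales i ""

-- the 3-digit groups of n, least significant first
def pvGroupsOf (n : Int) : List Int :=
  if h : n > 0 then PySem.Int.mod n 1000 :: pvGroupsOf (PySem.Int.floordiv n 1000) else []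
termination_by n.toNat
decreasing_by
  rw [PySem.Int.floordiv_eq_ediv_of_pos (by norm_num : (0:Int) < 1000)]
  omega

-- the " و"-joined pieces of n's groups, most significant first, starting at scale index i
def pvMsb (n : Int) (i : Int) : List String :=
  ((PySem.List.enumerate (pvGroupsOf n) i).reverse.filter (fun p => p.2 > 0)).map
    (fun p => pvPiece p.1 p.2)

-- A's result string after the loop, as a function of the pieces still to be prepended
def pvJoinTail (ps : List String) (result : String) : String :=
  if ps = [] then result
  else PySem.Str.join " و" ps ++ (if result ≠ "" then " و" ++ result else "")

-- nonempty with a non-space first (pvNL) / last (pvNR) character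
def pvNL (l : List Char) : Bool :=
  match l with
  | [] => false
  | c :: _ => !PySem.Chars.isspace c

def pvNR (l : List Char) : Bool := pvNL l.reverse

-- ---- clean-string lemmas ----

theorem pvNL_append (a b : List Char) (h : pvNL a = true) : pvNL (a ++ b) = true := by
  cases a with
  | nil => simp [pvNL] at h
  | cons c cs => simpa [pvNL] using h

theorem pvNR_append (a b : List Char) (h : pvNR b = true) : pvNR (a ++ b) = true := by
  unfold pvNR at *
  rw [List.reverse_append]
  exact pvNL_append _ _ h

theorem pv_lstrip_of_NL {l : List Char} (h : pvNL l = true) : PySem.Chars.lstrip l = l := by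
  cases l with
  | nil => simp [pvNL] at h
  | cons c cs =>
      simp only [pvNL, Bool.not_eq_true'] at h
      simp [PySem.Chars.lstrip, List.dropWhile_cons, h]

theorem pv_rstrip_of_NR {l : List Char} (h : pvNR l = true) : PySem.Chars.rstrip l = l := by
  unfold pvNR at h
  unfold PySem.Chars.rstrip
  have := pv_lstrip_of_NL h
  unfold PySem.Chars.lstrip at this
  rw [this, List.reverse_reverse]

theorem pv_strip_of_clean {l : List Char} (h1 : pvNL l = true) (h2 : pvNR l = true) :
    PySem.Chars.strip l = l := by
  unfold PySem.Chars.strip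
  rw [pv_lstrip_of_NL h1, pv_rstrip_of_NR h2]

theorem pv_strip_space {l : List Char} (h1 : pvNL l = true) (h2 : pvNR l = true) :
    PySem.Chars.strip (l ++ [' ']) = l := by
  unfold PySem.Chars.strip
  rw [pv_lstrip_of_NL (pvNL_append _ _ h1)]
  unfold PySem.Chars.rstrip
  rw [List.reverse_append]
  have hsp : PySem.Chars.isspace ' ' = true := by decide
  simp only [List.reverse_singleton, List.singleton_append, List.dropWhile_cons, hsp, if_true]
  have := pv_lstrip_of_NL (l := l.reverse) h2
  unfold PySem.Chars.lstrip at this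
  rw [this, List.reverse_reverse]

theorem pv_str_strip_clean (s : String) (h1 : pvNL s.toList = true) (h2 : pvNR s.toList = true) :
    PySem.Str.strip s = s := by
  apply String.toList_inj.mp
  rw [PySem.Str.toList_strip, pv_strip_of_clean h1 h2]

theorem pv_str_strip_space (s : String) (h1 : pvNL s.toList = true) (h2 : pvNR s.toList = true) :
    PySem.Str.strip (s ++ " ") = s := by
  apply String.toList_inj.mp
  rw [PySem.Str.toList_strip]
  have : (s ++ " ").toList = s.toList ++ [' '] := by simp
  rw [this, pv_strip_space h1 h2]

theorem pv_ne_empty_of_NL {s : String} (h : pvNL s.toList = true) : s ≠ "" := by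
  intro he
  subst he
  simp [pvNL] at h

-- ---- join lemmas (String level) ----

theorem pv_join_singleton (sep x : String) : PySem.Str.join sep [x] = x := by
  apply String.toList_inj.mp
  rw [PySem.Str.toList_join]
  simpa using PySem.Chars.join_singleton sep.toList x.toList

theorem pv_join_cons_cons (sep x y : String) (rest : List String) :
    PySem.Str.join sep (x :: y :: rest) = x ++ sep ++ PySem.Str.join sep (y :: rest) := by
  apply String.toList_inj.mp
  simp only [PySem.Str.toList_join, List.map_cons, String.toList_append]
  simpa [PySem.Str.toList_join] using
    PySem.Chars.join_cons_cons sep.toList x.toList y.toList (rest.map String.toList)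

theorem pv_join_snoc (sep p : String) (ps : List String) (h : ps ≠ []) :
    PySem.Str.join sep (ps ++ [p]) = PySem.Str.join sep ps ++ sep ++ p := by
  induction ps with
  | nil => simp at h
  | cons x rest ih =>
      cases rest with
      | nil => rw [List.singleton_append, pv_join_cons_cons, pv_join_singleton, pv_join_singleton]
      | cons y r2 =>
          have e1 : x :: y :: r2 ++ [p] = x :: y :: (r2 ++ [p]) := by simp
          rw [e1, pv_join_cons_cons sep x y (r2 ++ [p]),
            show y :: (r2 ++ [p]) = (y :: r2) ++ [p] by simp, ih (by simp),
            pv_join_cons_cons]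
          simp [String.append_assoc]

theorem pv_join_clean (sep : String) (ps : List String) (h : ps ≠ [])
    (hc : ∀ p ∈ ps, pvNL p.toList = true ∧ pvNR p.toList = true) :
    pvNL (PySem.Str.join sep ps).toList = true ∧ pvNR (PySem.Str.join sep ps).toList = true := by
  induction ps with
  | nil => simp at h
  | cons x rest ih =>
      cases rest with
      | nil =>
          rw [pv_join_singleton]
          exact hc x (by simp)
      | cons y r2 =>
          have hx := hc x (by simp)
          have hrest := ih (by simp) (fun p hp => hc p (by simp [hp]))
          rw [pv_join_cons_cons]
          constructor
          · simpa [String.toList_append] using pvNL_append _ _ hx.1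
          · simpa [String.toList_append, List.append_assoc] using pvNR_append
              (x.toList ++ sep.toList) _ hrest.2

theorem pv_append_ne_empty_left (a b : String) (h : a ≠ "") : a ++ b ≠ "" := by
  intro he
  apply h
  apply String.toList_inj.mp
  have := congrArg String.toList he
  simp only [String.toList_append] at this
  rcases List.append_eq_nil_iff.mp this with ⟨h1, _⟩
  simpa using h1

theorem pv_append_ne_empty_right (a b : String) (h : b ≠ "") : a ++ b ≠ "" := by
  intro he
  apply h
  apply String.toList_inj.mp
  have := congrArg String.toList he
  simp only [String.toList_append] at this
  rcases List.append_eq_nil_iff.mp this with ⟨_, h2⟩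
  simpa using h2

-- ---- cleanness of the word-table entries ----

theorem pv_clean_hw (h : Int) (h1 : 1 ≤ h) (h2 : h < 10) :
    pvNL (PySem.List.pyGetD pvHundreds h "").toList = true ∧
    pvNR (PySem.List.pyGetD pvHundreds h "").toList = true := by
  interval_cases h <;> exact ⟨by decide, by decide⟩

theorem pv_clean_teen (u : Int) (h1 : 0 ≤ u) (h2 : u < 10) :
    pvNL (PySem.List.pyGetD pvTeens u "").toList = true ∧
    pvNR (PySem.List.pyGetD pvTeens u "").toList = true := by
  interval_cases u <;> exact ⟨by decide, by decide⟩

theorem pv_clean_unit (u : Int) (h1 : 1 ≤ u) (h2 : u < 10) :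
    pvNL (PySem.List.pyGetD pvUnits u "").toList = true ∧
    pvNR (PySem.List.pyGetD pvUnits u "").toList = true := by
  interval_cases u <;> exact ⟨by decide, by decide⟩

theorem pv_clean_ten (t : Int) (h1 : 2 ≤ t) (h2 : t < 10) :
    pvNL (PySem.List.pyGetD pvTens t "").toList = true ∧
    pvNR (PySem.List.pyGetD pvTens t "").toList = true := by
  interval_cases t <;> exact ⟨by decide, by decide⟩

-- ---- cleanness of A's group text ----

set_option maxHeartbeats 1000000 in
theorem pv_clean_gtA (gv : Int) (hg1 : 1 ≤ gv) (hg2 : gv < 1000) :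
    pvNL (pvGroupTextA gv).toList = true ∧ pvNR (pvGroupTextA gv).toList = true := by
  have e1 : PySem.Int.floordiv gv 100 = gv / 100 :=
    PySem.Int.floordiv_eq_ediv_of_pos (by norm_num)
  have e2 : PySem.Int.mod gv 100 = gv % 100 :=
    PySem.Int.mod_eq_emod_of_pos (by norm_num)
  have e3 : PySem.Int.floordiv (gv % 100) 10 = gv % 100 / 10 :=
    PySem.Int.floordiv_eq_ediv_of_pos (by norm_num)
  have e4 : PySem.Int.mod gv 10 = gv % 10 :=
    PySem.Int.mod_eq_emod_of_pos (by norm_num)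
  simp only [pvGroupTextA, e1, e2, e3, e4]
  by_cases hH : gv / 100 > 0
  · simp only [if_pos hH]
    by_cases hTU : gv % 100 / 10 > 0 ∨ gv % 10 > 0
    · simp only [if_pos hTU]
      by_cases hT0 : gv % 100 / 10 = 0
      · have hU : gv % 10 > 0 := by omega
        simp only [if_pos hT0, if_pos hU]
        refine ⟨?_, ?_⟩
        · simp only [String.toList_append]
          exact pvNL_append _ _ (pvNL_append _ _ (pv_clean_hw (gv / 100) (by omega) (by omega)).1)
        · simp only [String.toList_append]
          exact pvNR_append _ _ (pv_clean_unit (gv % 10) (by omega) (by omega)).2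
      · simp only [if_neg hT0]
        by_cases hT1 : gv % 100 / 10 = 1
        · simp only [if_pos hT1]
          refine ⟨?_, ?_⟩
          · simp only [String.toList_append]
            exact pvNL_append _ _ (pvNL_append _ _ (pv_clean_hw (gv / 100) (by omega) (by omega)).1)
          · simp only [String.toList_append]
            exact pvNR_append _ _ (pv_clean_teen (gv % 10) (by omega) (by omega)).2
        · simp only [if_neg hT1]
          by_cases hU : gv % 10 > 0
          · simp only [if_pos hU]
            refine ⟨?_, ?_⟩
            · simp only [String.toList_append]
              exact pvNL_append _ _ (pvNL_append _ _ (pv_clean_hw (gv / 100) (by omega) (by omega)).1)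
            · simp only [String.toList_append]
              exact pvNR_append _ _ (pvNR_append _ _ (pv_clean_ten (gv % 100 / 10) (by omega) (by omega)).2)
          · simp only [if_neg hU]
            refine ⟨?_, ?_⟩
            · simp only [String.toList_append]
              exact pvNL_append _ _ (pvNL_append _ _ (pv_clean_hw (gv / 100) (by omega) (by omega)).1)
            · simp only [String.toList_append]
              exact pvNR_append _ _ (pv_clean_ten (gv % 100 / 10) (by omega) (by omega)).2
    · simp only [if_neg hTU]
      exact pv_clean_hw (gv / 100) (by omega) (by omega)
  · simp only [if_neg hH]
    have hTU : gv % 100 / 10 > 0 ∨ gv % 10 > 0 := by omega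
    simp only [if_pos hTU]
    by_cases hT0 : gv % 100 / 10 = 0
    · have hU : gv % 10 > 0 := by omega
      simp only [if_pos hT0, if_pos hU, String.empty_append]
      exact pv_clean_unit (gv % 10) (by omega) (by omega)
    · simp only [if_neg hT0]
      by_cases hT1 : gv % 100 / 10 = 1
      · simp only [if_pos hT1, String.empty_append]
        exact pv_clean_teen (gv % 10) (by omega) (by omega)
      · simp only [if_neg hT1]
        by_cases hU : gv % 10 > 0
        · simp only [if_pos hU, String.empty_append]
          refine ⟨?_, ?_⟩
          · simp only [String.toList_append]
            exact pvNL_append _ _ (pvNL_append _ _ (pv_clean_unit (gv % 10) (by omega) (by omega)).1)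
          · simp only [String.toList_append]
            exact pvNR_append _ _ (pv_clean_ten (gv % 100 / 10) (by omega) (by omega)).2
        · simp only [if_neg hU, String.empty_append]
          exact pv_clean_ten (gv % 100 / 10) (by omega) (by omega)

theorem pv_gtA_ne (gv : Int) (h1 : 1 ≤ gv) (h2 : gv < 1000) : pvGroupTextA gv ≠ "" :=
  pv_ne_empty_of_NL (pv_clean_gtA gv h1 h2).1

theorem pv_piece_ne (i gv : Int) (hi : i ≠ 0) (h1 : 1 ≤ gv) (h2 : gv < 1000) :
    pvPiece i gv ≠ "" := by
  unfold pvPiece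
  simp only [if_neg hi]
  by_cases hi1 : i = 1
  · simp only [if_pos hi1]
    split_ifs
    · decide
    · decide
    · exact pv_append_ne_empty_right _ _ (by decide)
    · exact pv_append_ne_empty_right _ _ (by decide)
  · simp only [if_neg hi1]
    exact pv_append_ne_empty_left _ _ (pv_append_ne_empty_right _ _ (by decide))

theorem pv_piece_clean (i gv : Int) (hi1 : 1 ≤ i) (hi4 : i ≤ 4) (h1 : 1 ≤ gv)
    (h2 : gv < 1000) :
    pvNL (pvPiece i gv).toList = true ∧ pvNR (pvPiece i gv).toList = true := by
  have hgt := pv_clean_gtA gv h1 h2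
  unfold pvPiece
  simp only [if_neg (show i ≠ 0 by omega)]
  by_cases hi : i = 1
  · simp only [if_pos hi]
    split_ifs
    · exact ⟨by decide, by decide⟩
    · exact ⟨by decide, by decide⟩
    · exact ⟨by rw [String.toList_append]; exact pvNL_append _ _ hgt.1,
        by rw [String.toList_append]; exact pvNR_append _ _ (by decide)⟩
    · exact ⟨by rw [String.toList_append]; exact pvNL_append _ _ hgt.1,
        by rw [String.toList_append]; exact pvNR_append _ _ (by decide)⟩
  · simp only [if_neg hi]
    constructor
    · rw [String.toList_append, String.toList_append]
      exact pvNL_append _ _ (pvNL_append _ _ hgt.1)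
    · rw [String.toList_append]
      interval_cases i <;>
        first
        | exact absurd rfl hi
        | exact pvNR_append _ _ (by decide)

-- ---- facts about the group list ----

theorem pv_groups_pos {n : Int} (h : n > 0) :
    pvGroupsOf n = PySem.Int.mod n 1000 :: pvGroupsOf (PySem.Int.floordiv n 1000) := by
  rw [pvGroupsOf]
  simp [h]

theorem pv_groups_neg {n : Int} (h : ¬ n > 0) : pvGroupsOf n = [] := by
  rw [pvGroupsOf]
  simp [h]

theorem pv_groups_mem_aux : ∀ (N : Nat) (n : Int), n.toNat ≤ N →
    ∀ g ∈ pvGroupsOf n, 0 ≤ g ∧ g < 1000 := by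
  intro N
  induction N with
  | zero =>
      intro n hn g hg
      rw [pv_groups_neg (by omega)] at hg
      simp at hg
  | succ N ih =>
      intro n hn g hg
      by_cases h : n > 0
      · rw [pv_groups_pos h] at hg
        rcases List.mem_cons.mp hg with hg | hg
        · subst hg
          exact ⟨PySem.Int.mod_nonneg n (by norm_num), PySem.Int.mod_lt n (by norm_num)⟩
        · have e : PySem.Int.floordiv n 1000 = n / 1000 :=
            PySem.Int.floordiv_eq_ediv_of_pos (by norm_num)
          exact ih (PySem.Int.floordiv n 1000) (by rw [e]; omega) g hg
      · rw [pv_groups_neg h] at hg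
        simp at hg

theorem pv_groups_mem {n g : Int} (hg : g ∈ pvGroupsOf n) : 0 ≤ g ∧ g < 1000 :=
  pv_groups_mem_aux n.toNat n le_rfl g hg

theorem pv_groups_len : ∀ (k : Nat) (n : Int), n < 1000 ^ k → (pvGroupsOf n).length ≤ k := by
  intro k
  induction k with
  | zero =>
      intro n hn
      have h1 : n < 1 := by simpa using hn
      rw [pv_groups_neg (by omega)]
      simp
  | succ k ih =>
      intro n hn
      by_cases h : n > 0
      · rw [pv_groups_pos h, List.length_cons]
        have hlt : PySem.Int.floordiv n 1000 < 1000 ^ k :=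
          (PySem.Int.floordiv_lt_iff_lt_mul (by norm_num)).mpr (by rw [← pow_succ]; exact hn)
        exact Nat.succ_le_succ (ih _ hlt)
      · rw [pv_groups_neg h]
        simp

-- ---- the most-significant-first piece list ----

theorem pv_msb_neg {n : Int} (i : Int) (h : ¬ n > 0) : pvMsb n i = [] := by
  unfold pvMsb
  rw [pv_groups_neg h]
  rfl

theorem pv_msb_step {n : Int} (i : Int) (h : n > 0) :
    pvMsb n i = pvMsb (PySem.Int.floordiv n 1000) (i + 1) ++
      (if PySem.Int.mod n 1000 > 0 then [pvPiece i (PySem.Int.mod n 1000)] else []) := by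
  unfold pvMsb
  rw [pv_groups_pos h, PySem.List.enumerate_cons, List.reverse_cons, List.filter_append,
    List.map_append]
  congr 1
  rw [List.filter_cons, List.filter_nil]
  by_cases hgv : PySem.Int.mod n 1000 > 0
  · rw [if_pos (by simpa using hgv), if_pos hgv, List.map_cons, List.map_nil]
  · rw [if_neg (by simpa using hgv), if_neg hgv, List.map_nil]

theorem pv_msb_mem {n i : Int} {p : String} (hp : p ∈ pvMsb n i) :
    ∃ j g, p = pvPiece j g ∧ i ≤ j ∧ j < i + (pvGroupsOf n).length ∧ 0 < g ∧
      g ∈ pvGroupsOf n := by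
  unfold pvMsb at hp
  rcases List.mem_map.mp hp with ⟨q, hq, hpq⟩
  have hq2 := List.mem_filter.mp hq
  have hqe : q ∈ PySem.List.enumerate (pvGroupsOf n) i := List.mem_reverse.mp hq2.1
  rcases (PySem.List.mem_enumerate_iff _ _ _).mp hqe with ⟨k, hk, hqk⟩
  refine ⟨q.1, q.2, hpq.symm, ?_, ?_, by simpa using hq2.2, ?_⟩
  · rw [hqk]; omega
  · rw [hqk]; simp only []; omega
  · rw [hqk]; exact List.getElem_mem hk

theorem pv_msb_ne_aux : ∀ (N : Nat) (n i : Int), n.toNat ≤ N → 0 < n → pvMsb n i ≠ [] := by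
  intro N
  induction N with
  | zero => intro n i hn h; omega
  | succ N ih =>
      intro n i hn h
      rw [pv_msb_step i h]
      have e : PySem.Int.floordiv n 1000 = n / 1000 :=
        PySem.Int.floordiv_eq_ediv_of_pos (by norm_num)
      have em : PySem.Int.mod n 1000 = n % 1000 :=
        PySem.Int.mod_eq_emod_of_pos (by norm_num)
      by_cases hgv : PySem.Int.mod n 1000 > 0
      · rw [if_pos hgv]
        simp
      · rw [if_neg hgv, List.append_nil]
        apply ih
        · rw [e]; omega
        · rw [e]; omega

theorem pv_msb_ne {n : Int} (i : Int) (h : 0 < n) : pvMsb n i ≠ [] :=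
  pv_msb_ne_aux n.toNat n i le_rfl h

-- ---- A's loop result as a function of the remaining pieces ----

theorem pv_joinTail_nil (r : String) : pvJoinTail [] r = r := by
  simp [pvJoinTail]

theorem pv_joinTail_snoc (ps : List String) (p r : String) (hp : p ≠ "") :
    pvJoinTail ps (p ++ (if r ≠ "" then " و" ++ r else "")) = pvJoinTail (ps ++ [p]) r := by
  have hRHS : pvJoinTail (ps ++ [p]) r =
      PySem.Str.join " و" (ps ++ [p]) ++ (if r ≠ "" then " و" ++ r else "") := by
    unfold pvJoinTail
    rw [if_neg (by simp)]
  rw [hRHS]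
  cases ps with
  | nil =>
      rw [List.nil_append, pv_join_singleton]
      unfold pvJoinTail
      rw [if_pos rfl]
  | cons x rest =>
      unfold pvJoinTail
      rw [if_neg (by simp : ¬ x :: rest = []), if_pos (pv_append_ne_empty_left _ _ hp),
        pv_join_snoc _ _ _ (by simp)]
      simp only [String.append_assoc]

theorem pv_msb_clean (n i : Int) (hi1 : 1 ≤ i)
    (hbound : i + ((pvGroupsOf n).length : Int) ≤ 5) (hne : pvMsb n i ≠ []) :
    pvNL (PySem.Str.join " و" (pvMsb n i)).toList = true ∧
    pvNR (PySem.Str.join " و" (pvMsb n i)).toList = true := by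
  apply pv_join_clean _ _ hne
  intro p hp
  rcases pv_msb_mem hp with ⟨j, g, hpe, hij, hjlen, hg0, hgmem⟩
  have hgb := pv_groups_mem hgmem
  rw [hpe]
  exact pv_piece_clean j g (by omega) (by omega) (by omega) (by omega)

-- ---- the loop invariant: A's loop computes pvJoinTail of the piece list ----

theorem pv_invA : ∀ (N : Nat) (n : Int), n.toNat ≤ N → ∀ (i : Int) (r : String), 1 ≤ i →
    pvLoopA n i r = pvJoinTail (pvMsb n i) r := by
  intro N
  induction N with
  | zero =>
      intro n hn i r hi
      rw [pvLoopA, dif_neg (by omega : ¬ n > 0), pv_msb_neg i (by omega), pv_joinTail_nil]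
  | succ N ih =>
      intro n hn i r hi
      by_cases h : n > 0
      · have e : PySem.Int.floordiv n 1000 = n / 1000 :=
          PySem.Int.floordiv_eq_ediv_of_pos (by norm_num)
        have hn' : (PySem.Int.floordiv n 1000).toNat ≤ N := by rw [e]; omega
        have hgv0 : 0 ≤ PySem.Int.mod n 1000 := PySem.Int.mod_nonneg n (by norm_num)
        have hgv9 : PySem.Int.mod n 1000 < 1000 := PySem.Int.mod_lt n (by norm_num)
        rw [pvLoopA, dif_pos h]
        simp only []
        rw [ih _ hn' (i + 1) _ (by omega), pv_msb_step i h]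
        by_cases hgv : PySem.Int.mod n 1000 > 0
        · rw [if_pos hgv, if_pos hgv]
          have hgtne : pvGroupTextA (PySem.Int.mod n 1000) ≠ "" :=
            pv_gtA_ne _ (by omega) hgv9
          rw [if_pos hgtne, if_neg (by omega : ¬ i = 0)]
          rw [← pv_joinTail_snoc _ _ _ (pv_piece_ne i _ (by omega) (by omega) hgv9)]
          congr 1
          unfold pvPiece
          rw [if_neg (by omega : ¬ i = 0)]
          by_cases hi1 : i = 1
          · rw [if_pos hi1, if_pos hi1]
            by_cases h1 : PySem.Int.mod n 1000 = 1
            · rw [if_pos h1, if_pos h1,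
                show PySem.List.pyGetD pvThousands 0 "" = "ألف" from by decide]
            · rw [if_neg h1, if_neg h1]
              by_cases h2 : PySem.Int.mod n 1000 = 2
              · rw [if_pos h2, if_pos h2,
                  show PySem.List.pyGetD pvThousands 1 "" = "ألفان" from by decide]
              · rw [if_neg h2, if_neg h2]
                by_cases h3 : 3 ≤ PySem.Int.mod n 1000 ∧ PySem.Int.mod n 1000 ≤ 10
                · rw [if_pos h3, if_pos h3,
                    show PySem.List.pyGetD pvThousands 2 "" = "آلاف" from by decide]
                  rw [String.append_assoc (s₂ := " ") (s₃ := "آلاف"),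
                    show (" " ++ "آلاف" : String) = " آلاف" from by decide]
                · rw [if_neg h3, if_neg h3,
                    show PySem.List.pyGetD pvThousands 3 "" = "ألف" from by decide]
                  rw [String.append_assoc (s₂ := " ") (s₃ := "ألف"),
                    show (" " ++ "ألف" : String) = " ألف" from by decide]
          · rw [if_neg hi1, if_neg hi1]
        · rw [if_neg hgv, if_neg hgv, List.append_nil]
      · rw [pvLoopA, dif_neg h, pv_msb_neg i h, pv_joinTail_nil]

-- ---- A's whole computation: strip of the loop = join of the piece list ----

theorem pv_stripA (num : Int) (hp : 0 < num) (hb : num ≤ 2147483648) :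
    PySem.Str.strip (pvLoopA num 0 "") = PySem.Str.join " و" (pvMsb num 0) := by
  have e : PySem.Int.floordiv num 1000 = num / 1000 :=
    PySem.Int.floordiv_eq_ediv_of_pos (by norm_num)
  have hlt4 : PySem.Int.floordiv num 1000 < 1000 ^ 4 := by
    rw [e]; norm_num; omega
  have hlen : (pvGroupsOf (PySem.Int.floordiv num 1000)).length ≤ 4 :=
    pv_groups_len 4 _ hlt4
  have hgv0 : 0 ≤ PySem.Int.mod num 1000 := PySem.Int.mod_nonneg num (by norm_num)
  have hgv9 : PySem.Int.mod num 1000 < 1000 := PySem.Int.mod_lt num (by norm_num)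
  rw [pvLoopA, dif_pos hp]
  simp only []
  rw [pv_invA num.toNat (PySem.Int.floordiv num 1000) (by rw [e]; omega) (0 + 1) _
    (by norm_num), pv_msb_step 0 hp]
  by_cases hgv : PySem.Int.mod num 1000 > 0
  · rw [if_pos hgv, if_pos hgv]
    have hcw := pv_clean_gtA (PySem.Int.mod num 1000) (by omega) hgv9
    have hgtne := pv_gtA_ne (PySem.Int.mod num 1000) (by omega) hgv9
    rw [if_pos hgtne]
    simp only [if_true]
    rw [String.append_empty]
    have hpiece : pvPiece 0 (PySem.Int.mod num 1000) = pvGroupTextA (PySem.Int.mod num 1000) := by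
      unfold pvPiece
      rw [if_pos rfl]
    rw [← hpiece]
    have hcp : pvNL (pvPiece 0 (PySem.Int.mod num 1000)).toList = true ∧
        pvNR (pvPiece 0 (PySem.Int.mod num 1000)).toList = true := by
      rw [hpiece]; exact hcw
    cases hms : pvMsb (PySem.Int.floordiv num 1000) (0 + 1) with
    | nil =>
        rw [pv_joinTail_nil, List.nil_append, pv_join_singleton]
        exact pv_str_strip_space _ hcp.1 hcp.2
    | cons x rest =>
        have hne : pvMsb (PySem.Int.floordiv num 1000) (0 + 1) ≠ [] := by
          rw [hms]; simp
        have hcj := pv_msb_clean (PySem.Int.floordiv num 1000) (0 + 1) (by norm_num)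
          (by push_cast; omega) hne
        rw [hms] at hcj
        unfold pvJoinTail
        rw [if_neg (by simp : ¬ x :: rest = []),
          if_pos (pv_append_ne_empty_right _ _ (by decide : (" " : String) ≠ "")),
          pv_join_snoc _ _ _ (by simp : x :: rest ≠ [])]
        rw [show (" و" : String) ++ (pvPiece 0 (PySem.Int.mod num 1000) ++ " ") =
            (" و" ++ pvPiece 0 (PySem.Int.mod num 1000)) ++ " " from
            (String.append_assoc).symm, ← String.append_assoc]
        rw [pv_str_strip_space _
          (by rw [String.toList_append]; exact pvNL_append _ _ hcj.1)
          (by rw [String.toList_append, String.toList_append]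
              exact pvNR_append _ _ (pvNR_append _ _ hcp.2)),
          ← String.append_assoc]
  · rw [if_neg hgv, if_neg hgv, List.append_nil]
    cases hms : pvMsb (PySem.Int.floordiv num 1000) (0 + 1) with
    | nil =>
        rw [pv_joinTail_nil]
        decide
    | cons x rest =>
        have hne : pvMsb (PySem.Int.floordiv num 1000) (0 + 1) ≠ [] := by
          rw [hms]; simp
        have hcj := pv_msb_clean (PySem.Int.floordiv num 1000) (0 + 1) (by norm_num)
          (by push_cast; omega) hne
        rw [hms] at hcj
        unfold pvJoinTail
        rw [if_neg (by simp : ¬ x :: rest = []), if_neg (by simp), String.append_empty]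
        exact pv_str_strip_clean _ hcj.1 hcj.2

-- ---- B's recursive descent agrees with the piece list ----

theorem pv_emod_mul_ediv (n K : Int) (hK : 0 < K) :
    n % (1000 * K) / 1000 = n / 1000 % K := by
  have hKK : (0:Int) < 1000 * K := by positivity
  have hdef : n % (1000 * K) = n - 1000 * K * (n / (1000 * K)) := Int.emod_def n (1000 * K)
  have hm0 : 0 ≤ n % (1000 * K) := Int.emod_nonneg n (by positivity)
  have hmlt : n % (1000 * K) < 1000 * K := Int.emod_lt_of_pos n hKK
  have h1 : n / 1000 = n % (1000 * K) / 1000 + K * (n / (1000 * K)) := by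
    conv_lhs => rw [show n = n % (1000 * K) + 1000 * (K * (n / (1000 * K))) by rw [hdef]; ring]
    rw [Int.add_mul_ediv_left _ _ (by norm_num : (1000:Int) ≠ 0)]
  have h2 : n % (1000 * K) / 1000 < K := by
    rw [Int.ediv_lt_iff_lt_mul (by norm_num : (0:Int) < 1000), mul_comm K 1000]
    exact hmlt
  have h3 : 0 ≤ n % (1000 * K) / 1000 := Int.ediv_nonneg hm0 (by norm_num)
  rw [h1, Int.add_mul_emod_self_left, Int.emod_eq_of_lt h3 h2]

theorem pv_msb_split : ∀ (k : Nat) (n i : Int), (1000:Int) ^ k ≤ n → n < (1000:Int) ^ (k + 1) →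
    pvMsb n i = pvPiece (i + (k : Int)) (n / 1000 ^ k) :: pvMsb (n % 1000 ^ k) i := by
  intro k
  induction k with
  | zero =>
      intro n i h1 h2
      norm_num at h1 h2
      have hn : n > 0 := by omega
      have em : PySem.Int.mod n 1000 = n % 1000 := PySem.Int.mod_eq_emod_of_pos (by norm_num)
      have ed : PySem.Int.floordiv n 1000 = n / 1000 := PySem.Int.floordiv_eq_ediv_of_pos (by norm_num)
      have hm : n % 1000 = n := by omega
      have hd : n / 1000 = 0 := by omega
      rw [pv_msb_step i hn, em, ed, hm, hd, pv_msb_neg (i + 1) (by norm_num), if_pos hn,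
        List.nil_append]
      simp only [pow_zero, Int.ediv_one, Int.emod_one, Nat.cast_zero, add_zero]
      rw [pv_msb_neg i (by norm_num : ¬ (0:Int) > 0)]
  | succ k ih =>
      intro n i h1 h2
      have hK : (0:Int) < 1000 ^ k := by positivity
      have hn : n > 0 := by
        have hpos : (0:Int) < 1000 ^ (k + 1) := by positivity
        omega
      have em : PySem.Int.mod n 1000 = n % 1000 := PySem.Int.mod_eq_emod_of_pos (by norm_num)
      have ed : PySem.Int.floordiv n 1000 = n / 1000 := PySem.Int.floordiv_eq_ediv_of_pos (by norm_num)
      rw [pv_msb_step i hn, em, ed]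
      have hb1 : 1000 ^ k ≤ n / 1000 := by
        rw [Int.le_ediv_iff_mul_le (by norm_num : (0:Int) < 1000), ← pow_succ]
        exact h1
      have hb2 : n / 1000 < 1000 ^ (k + 1) := by
        rw [Int.ediv_lt_iff_lt_mul (by norm_num : (0:Int) < 1000), ← pow_succ]
        exact h2
      rw [ih (n / 1000) (i + 1) hb1 hb2]
      have ea : n / 1000 / 1000 ^ k = n / 1000 ^ (k + 1) := by
        rw [Int.ediv_ediv_of_nonneg (show (0:Int) ≤ 1000 by norm_num), ← pow_succ']
      have eb : (n % 1000 ^ (k + 1)) % 1000 = n % 1000 := by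
        rw [show ((1000:Int)) ^ (k + 1) = 1000 * 1000 ^ k from by rw [pow_succ']]
        exact Int.emod_emod_of_dvd n ⟨1000 ^ k, rfl⟩
      have ec : (n % 1000 ^ (k + 1)) / 1000 = n / 1000 % 1000 ^ k := by
        rw [show ((1000:Int)) ^ (k + 1) = 1000 * 1000 ^ k from by rw [pow_succ']]
        exact pv_emod_mul_ediv n (1000 ^ k) hK
      rw [List.cons_append, ea]
      congr 1
      · congr 1
        push_cast
        ring
      · by_cases hm : n % 1000 ^ (k + 1) > 0
        · have em2 : PySem.Int.mod (n % 1000 ^ (k + 1)) 1000 = (n % 1000 ^ (k + 1)) % 1000 :=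
            PySem.Int.mod_eq_emod_of_pos (by norm_num)
          have ed2 : PySem.Int.floordiv (n % 1000 ^ (k + 1)) 1000 = (n % 1000 ^ (k + 1)) / 1000 :=
            PySem.Int.floordiv_eq_ediv_of_pos (by norm_num)
          rw [pv_msb_step i hm, em2, ed2, eb, ec]
        · have hnn : 0 ≤ n % 1000 ^ (k + 1) := Int.emod_nonneg n (by positivity)
          have hm0 : n % 1000 ^ (k + 1) = 0 := by omega
          have h1000 : n % 1000 = 0 := by rw [← eb, hm0]; simp
          have hdiv0 : n / 1000 % 1000 ^ k = 0 := by rw [← ec, hm0]; simp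
          rw [hdiv0, pv_msb_neg (i + 1) (by norm_num), List.nil_append,
            if_neg (by omega : ¬ n % 1000 > 0), hm0, pv_msb_neg i (by norm_num)]

-- ---- the two sub-1000 renderings agree ----

theorem pv_gtA_hundreds (n : Int) (h1 : 100 ≤ n) (h2 : n ≤ 999) (h3 : n % 100 = 0) :
    pvGroupTextA n = PySem.List.pyGetD pvHundreds (n / 100) "" := by
  have e1 : PySem.Int.floordiv n 100 = n / 100 := PySem.Int.floordiv_eq_ediv_of_pos (by norm_num)
  have e2 : PySem.Int.mod n 100 = n % 100 := PySem.Int.mod_eq_emod_of_pos (by norm_num)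
  have e3 : PySem.Int.floordiv (n % 100) 10 = n % 100 / 10 :=
    PySem.Int.floordiv_eq_ediv_of_pos (by norm_num)
  have e4 : PySem.Int.mod n 10 = n % 10 := PySem.Int.mod_eq_emod_of_pos (by norm_num)
  simp only [pvGroupTextA, e1, e2, e3, e4]
  rw [if_neg (by omega : ¬ (n % 100 / 10 > 0 ∨ n % 10 > 0)), if_pos (by omega : n / 100 > 0)]

theorem pv_gtA_split (n : Int) (h1 : 100 ≤ n) (h2 : n ≤ 999) (h3 : n % 100 ≠ 0) :
    pvGroupTextA n = PySem.List.pyGetD pvHundreds (n / 100) "" ++ (" و" ++ pvGroupTextA (n % 100)) := by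
  have e1 : PySem.Int.floordiv n 100 = n / 100 := PySem.Int.floordiv_eq_ediv_of_pos (by norm_num)
  have e2 : PySem.Int.mod n 100 = n % 100 := PySem.Int.mod_eq_emod_of_pos (by norm_num)
  have e3 : PySem.Int.floordiv (n % 100) 10 = n % 100 / 10 :=
    PySem.Int.floordiv_eq_ediv_of_pos (by norm_num)
  have e4 : PySem.Int.mod n 10 = n % 10 := PySem.Int.mod_eq_emod_of_pos (by norm_num)
  have f1 : PySem.Int.floordiv (n % 100) 100 = n % 100 / 100 :=
    PySem.Int.floordiv_eq_ediv_of_pos (by norm_num)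
  have f2 : PySem.Int.mod (n % 100) 100 = n % 100 % 100 :=
    PySem.Int.mod_eq_emod_of_pos (by norm_num)
  have f3 : PySem.Int.floordiv (n % 100 % 100) 10 = n % 100 % 100 / 10 :=
    PySem.Int.floordiv_eq_ediv_of_pos (by norm_num)
  have f4 : PySem.Int.mod (n % 100) 10 = n % 100 % 10 :=
    PySem.Int.mod_eq_emod_of_pos (by norm_num)
  have g1 : n % 100 % 100 = n % 100 := by omega
  have g2 : n % 100 % 10 = n % 10 := by omega
  have g3 : ¬ (n % 100 / 100 > 0) := by omega
  simp only [pvGroupTextA, e1, e2, e3, e4, f1, f2, f3, f4, g1, g2]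
  rw [if_pos (by omega : n % 100 / 10 > 0 ∨ n % 10 > 0),
    if_pos (by omega : n % 100 / 10 > 0 ∨ n % 10 > 0),
    if_pos (by omega : n / 100 > 0), if_pos (by omega : n / 100 > 0), if_neg g3, if_neg g3]
  split_ifs <;> simp [String.append_assoc, String.empty_append, String.append_empty]

theorem pv_small_lt100 (n : Int) (h1 : 1 ≤ n) (h2 : n ≤ 99) : pvSmall n = pvGroupTextA n := by
  have e1 : PySem.Int.floordiv n 100 = n / 100 := PySem.Int.floordiv_eq_ediv_of_pos (by norm_num)
  have e2 : PySem.Int.mod n 100 = n % 100 := PySem.Int.mod_eq_emod_of_pos (by norm_num)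
  have e3 : PySem.Int.floordiv (n % 100) 10 = n % 100 / 10 :=
    PySem.Int.floordiv_eq_ediv_of_pos (by norm_num)
  have e4 : PySem.Int.mod n 10 = n % 10 := PySem.Int.mod_eq_emod_of_pos (by norm_num)
  have e5 : PySem.Int.floordiv n 10 = n / 10 := PySem.Int.floordiv_eq_ediv_of_pos (by norm_num)
  rw [pvSmall, dif_neg (by omega : ¬ n ≥ 100)]
  simp only [pvGroupTextA, e1, e2, e3, e4, e5]
  simp only [if_neg (show ¬ (n / 100 > 0) from by omega), String.empty_append]
  rw [if_pos (show n % 100 / 10 > 0 ∨ n % 10 > 0 from by omega)]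
  by_cases h20 : n ≥ 20
  · rw [if_pos h20, if_neg (by omega : ¬ (n % 100 / 10 = 0)),
      if_neg (by omega : ¬ (n % 100 / 10 = 1)),
      show n % 100 / 10 = n / 10 from by omega]
    by_cases hU : n % 10 > 0
    · rw [if_pos (show n % 10 ≠ 0 from by omega), if_pos hU]
    · rw [if_neg (show ¬ n % 10 ≠ 0 from by omega), if_neg hU, String.empty_append]
  · rw [if_neg h20]
    by_cases h10 : n ≥ 10
    · rw [if_pos h10, if_neg (by omega : ¬ (n % 100 / 10 = 0)),
        if_pos (by omega : n % 100 / 10 = 1), show n % 10 = n - 10 from by omega]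
    · rw [if_neg h10, if_pos (by omega : n % 100 / 10 = 0), if_pos (by omega : n % 10 > 0),
        show n % 10 = n from by omega]

theorem pv_small_eq : ∀ (N : Nat) (n : Int), n.toNat ≤ N → 1 ≤ n → n ≤ 999 →
    pvSmall n = pvGroupTextA n := by
  intro N
  induction N with
  | zero => intro n hn h1 h2; omega
  | succ N ih =>
      intro n hn h1 h2
      by_cases hge : n ≥ 100
      · rw [pvSmall, dif_pos hge]
        simp only []
        have em : PySem.Int.mod n 100 = n % 100 := PySem.Int.mod_eq_emod_of_pos (by norm_num)
        have ed : PySem.Int.floordiv n 100 = n / 100 :=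
          PySem.Int.floordiv_eq_ediv_of_pos (by norm_num)
        rw [em, ed]
        by_cases hr : n % 100 = 0
        · rw [if_neg (by omega : ¬ n % 100 ≠ 0), String.append_empty,
            pv_gtA_hundreds n hge h2 hr]
        · rw [if_pos hr, ih (n % 100) (by omega) (by omega) (by omega),
            pv_gtA_split n hge h2 hr]
      · exact pv_small_lt100 n h1 (by omega)

-- ---- join of a split piece list ----

theorem pv_join_cons_msb (p : String) (r : Int) (hr0 : 0 ≤ r) (s : String)
    (hs : 0 < r → s = PySem.Str.join " و" (pvMsb r 0)) :
    PySem.Str.join " و" (p :: pvMsb r 0) = p ++ (if r ≠ 0 then " و" ++ s else "") := by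
  by_cases h : r = 0
  · subst h
    rw [pv_msb_neg 0 (by norm_num), pv_join_singleton, if_neg (by simp), String.append_empty]
  · have hr' : 0 < r := by omega
    have hne := pv_msb_ne 0 hr'
    cases hms : pvMsb r 0 with
    | nil => exact absurd hms hne
    | cons x l =>
        rw [pv_join_cons_cons, if_pos h, hs hr', hms, String.append_assoc]

-- ---- B's whole computation: pvSpell = join of the piece list ----

theorem pv_spell_eq : ∀ (N : Nat) (n : Int), n.toNat ≤ N → 1 ≤ n → n < 1000000000000 →
    pvSpell n = PySem.Str.join " و" (pvMsb n 0) := by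
  intro N
  induction N with
  | zero => intro n hn h1 h2; omega
  | succ N ih =>
      intro n hn h1 h2
      rw [pvSpell, dif_neg (by omega : ¬ n ≥ 1000000000000)]
      by_cases h9 : n ≥ 1000000000
      · rw [dif_pos h9]
        simp only []
        have em : PySem.Int.mod n 1000000000 = n % 1000000000 :=
          PySem.Int.mod_eq_emod_of_pos (by norm_num)
        have ed : PySem.Int.floordiv n 1000000000 = n / 1000000000 :=
          PySem.Int.floordiv_eq_ediv_of_pos (by norm_num)
        rw [em, ed]
        have hsplit := pv_msb_split 3 n 0 (by norm_num; omega) (by norm_num; omega)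
        rw [show ((1000:Int)) ^ (3:Nat) = 1000000000 from by norm_num,
          show (0:Int) + ((3:Nat):Int) = 3 from by norm_num] at hsplit
        rw [hsplit, pv_join_cons_msb (pvPiece _ (n / 1000000000)) (n % 1000000000) (by omega) (pvSpell (n % 1000000000))
          (fun hr => ih (n % 1000000000) (by omega) (by omega) (by omega))]
        rw [show pvPiece 3 (n / 1000000000) = pvGroupTextA (n / 1000000000) ++ " " ++
            PySem.List.pyGetD pvScales 3 "" from by unfold pvPiece; norm_num,
          show PySem.List.pyGetD pvScales (3:Int) "" = "مليار" from by decide,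
          pv_small_eq (n / 1000000000).toNat _ le_rfl (by omega) (by omega)]
      · rw [dif_neg h9]
        by_cases h6 : n ≥ 1000000
        · rw [dif_pos h6]
          simp only []
          have em : PySem.Int.mod n 1000000 = n % 1000000 :=
            PySem.Int.mod_eq_emod_of_pos (by norm_num)
          have ed : PySem.Int.floordiv n 1000000 = n / 1000000 :=
            PySem.Int.floordiv_eq_ediv_of_pos (by norm_num)
          rw [em, ed]
          have hsplit := pv_msb_split 2 n 0 (by norm_num; omega) (by norm_num; omega)
          rw [show ((1000:Int)) ^ (2:Nat) = 1000000 from by norm_num,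
            show (0:Int) + ((2:Nat):Int) = 2 from by norm_num] at hsplit
          rw [hsplit, pv_join_cons_msb (pvPiece _ (n / 1000000)) (n % 1000000) (by omega) (pvSpell (n % 1000000))
            (fun hr => ih (n % 1000000) (by omega) (by omega) (by omega))]
          rw [show pvPiece 2 (n / 1000000) = pvGroupTextA (n / 1000000) ++ " " ++
              PySem.List.pyGetD pvScales 2 "" from by unfold pvPiece; norm_num,
            show PySem.List.pyGetD pvScales (2:Int) "" = "مليون" from by decide,
            pv_small_eq (n / 1000000).toNat _ le_rfl (by omega) (by omega)]
        · rw [dif_neg h6]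
          by_cases h3 : n ≥ 1000
          · rw [dif_pos h3]
            simp only []
            have em : PySem.Int.mod n 1000 = n % 1000 :=
              PySem.Int.mod_eq_emod_of_pos (by norm_num)
            have ed : PySem.Int.floordiv n 1000 = n / 1000 :=
              PySem.Int.floordiv_eq_ediv_of_pos (by norm_num)
            rw [em, ed]
            have hsplit := pv_msb_split 1 n 0 (by norm_num; omega) (by norm_num; omega)
            rw [show ((1000:Int)) ^ (1:Nat) = 1000 from by norm_num,
              show (0:Int) + ((1:Nat):Int) = 1 from by norm_num] at hsplit
            rw [hsplit, pv_join_cons_msb (pvPiece _ (n / 1000)) (n % 1000) (by omega) (pvSpell (n % 1000))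
              (fun hr => ih (n % 1000) (by omega) (by omega) (by omega))]
            have hd1 : 1 ≤ n / 1000 := by omega
            have hd999 : n / 1000 ≤ 999 := by omega
            have hpc : (if n / 1000 = 1 then ("ألف" : String)
                else if n / 1000 = 2 then "ألفان"
                else if n / 1000 ≤ 10 then pvSmall (n / 1000) ++ " آلاف"
                else pvSmall (n / 1000) ++ " ألف") = pvPiece 1 (n / 1000) := by
              unfold pvPiece
              rw [if_neg (by norm_num : ¬ (1:Int) = 0), if_pos rfl]
              by_cases q1 : n / 1000 = 1
              · rw [if_pos q1, if_pos q1]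
              · rw [if_neg q1, if_neg q1]
                by_cases q2 : n / 1000 = 2
                · rw [if_pos q2, if_pos q2]
                · rw [if_neg q2, if_neg q2,
                    pv_small_eq (n / 1000).toNat _ le_rfl hd1 hd999]
                  by_cases q10 : n / 1000 ≤ 10
                  · rw [if_pos q10,
                      if_pos (show 3 ≤ n / 1000 ∧ n / 1000 ≤ 10 by omega)]
                  · rw [if_neg q10,
                      if_neg (show ¬ (3 ≤ n / 1000 ∧ n / 1000 ≤ 10) by omega)]
            rw [hpc]
          · rw [dif_neg h3]
            have hsplit := pv_msb_split 0 n 0 (by norm_num; omega) (by norm_num; omega)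
            simp only [pow_zero, Int.ediv_one, Int.emod_one, Nat.cast_zero, add_zero] at hsplit
            rw [hsplit, pv_msb_neg (0:Int) (by norm_num : ¬ (0:Int) > 0), pv_join_singleton,
              pv_small_eq n.toNat n le_rfl (by omega) (by omega)]
            unfold pvPiece
            rw [if_pos rfl]

-- ===== VERDICT (by name: the statement is the Claim_ definition above) =====
theorem number_to_arabic_text_spec : Claim_equal_number_to_arabic_text := by
  unfold Claim_equal_number_to_arabic_text
  intro num hdom
  unfold Spec_number_to_arabic_text
  have hbound : -2147483648 ≤ num ∧ num ≤ 2147483648 := by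
    simpa [Dom_number_to_arabic_text, pvDomInt] using hdom
  by_cases h0 : num = 0
  · subst h0; rfl
  · unfold number_to_arabic_text number_to_arabic_text_alt
    rw [if_neg h0, if_neg h0]
    congr 1
    by_cases hp : num > 0
    · rw [if_pos hp, pv_stripA num hp hbound.2,
        pv_spell_eq num.toNat num le_rfl (by omega) (by omega)]
    · rw [if_neg hp, pvLoopA, dif_neg hp]
      decide
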